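-- pv_equiv track=rewrite | github.com/ryansdowning/aoc-2020 | aoc_2020/day12.py | update_waypoint
-- ===== SOURCE A (Python) =====
-- def update_waypoint(turn, angle, waypoint):
--     angle = (angle % 360) // 90
--     x, y = waypoint['x'], waypoint['y']
--     if turn == "R":
--         for _ in range(angle):
--             x, y = y, -x
--     elif turn == "L":
--         for _ in range(angle):
--             x, y = -y, x
--     waypoint['x'], waypoint['y'] = x, y
--     return waypoint
-- ===== SOURCE B (Python) =====
-- def update_waypoint(turn, angle, waypoint):
--     # Normalize both turn directions to a single count q of clockwise quarter-turns,
--     # then apply the integer rotation matrix (c, s) once: x' = c*x + s*y, y' = c*y - s*x.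
--     k = (angle % 360) // 90
--     if turn == "R":
--         q = k
--     elif turn == "L":
--         q = (-k) % 4
--     else:
--         q = 0
--     c, s = ((1, 0), (0, 1), (-1, 0), (0, -1))[q]
--     x, y = waypoint['x'], waypoint['y']
--     waypoint['x'] = c * x + s * y
--     waypoint['y'] = c * y - s * x
--     return waypoint
-- ===== Notes on version B (the rewrite author's own statement) =====
-- stated objective: alternative
-- what changed: Replaces A's per-direction 0-3 iteration rotation loops by normalizing L to clockwise quarter-turns (q = (-k) % 4) and applying one integer rotation-matrix step x' = c*x + s*y, y' = c*y - s*x with (c,s) looked up by q.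
import Mathlib
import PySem

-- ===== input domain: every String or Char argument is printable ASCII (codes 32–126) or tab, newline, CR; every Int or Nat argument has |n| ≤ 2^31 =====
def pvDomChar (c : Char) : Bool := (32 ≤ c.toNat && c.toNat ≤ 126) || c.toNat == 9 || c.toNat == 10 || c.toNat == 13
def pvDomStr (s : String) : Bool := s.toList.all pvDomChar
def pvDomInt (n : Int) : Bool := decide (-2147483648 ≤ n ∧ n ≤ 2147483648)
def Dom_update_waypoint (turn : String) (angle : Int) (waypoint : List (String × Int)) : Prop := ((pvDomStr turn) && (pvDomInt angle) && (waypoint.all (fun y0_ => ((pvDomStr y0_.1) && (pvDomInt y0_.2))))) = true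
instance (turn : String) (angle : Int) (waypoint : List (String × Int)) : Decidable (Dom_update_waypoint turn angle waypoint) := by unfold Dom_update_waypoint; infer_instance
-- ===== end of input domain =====

-- B normalizes L-turns to clockwise quarter-turns and applies one integer rotation-matrix step
-- instead of A's 0-3-iteration loops ('alternative'); both Pythons mutate `waypoint` in place
-- identically, the equivalence proved is about the return value.

-- ===== PORT A =====
def update_waypoint (turn : String) (angle : Int) (waypoint : List (String × Int)) : List (String × Int) :=
  let d := PySem.Dict.mk waypoint
  let angle := PySem.Int.floordiv (PySem.Int.mod angle 360) 90
  let x := d.getD "x" 0   -- KeyError on a missing key is excluded by Pre_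
  let y := d.getD "y" 0
  let xy :=
    if turn = "R" then
      (PySem.List.pyRange 0 angle 1).foldl (fun (p : Int × Int) _ => (p.2, -p.1)) (x, y)
    else if turn = "L" then
      (PySem.List.pyRange 0 angle 1).foldl (fun (p : Int × Int) _ => (-p.2, p.1)) (x, y)
    else (x, y)
  ((d.insert "x" xy.1).insert "y" xy.2).items

-- ===== PORT B =====
def update_waypoint_alt (turn : String) (angle : Int) (waypoint : List (String × Int)) : List (String × Int) :=
  let d := PySem.Dict.mk waypoint
  let k := PySem.Int.floordiv (PySem.Int.mod angle 360) 90
  let q : Int := if turn = "R" then k else if turn = "L" then PySem.Int.mod (-k) 4 else 0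
  -- tuple indexing ((1,0),(0,1),(-1,0),(0,-1))[q]; q always lies in 0..3, so pyGetD is exact here
  let cs : Int × Int := PySem.List.pyGetD [(1, 0), (0, 1), (-1, 0), (0, -1)] q (1, 0)
  let x := d.getD "x" 0   -- KeyError on a missing key is excluded by Pre_
  let y := d.getD "y" 0
  ((d.insert "x" (cs.1 * x + cs.2 * y)).insert "y" (cs.1 * y - cs.2 * x)).items

-- ===== PRECONDITION & SPEC =====
-- Pre_ excludes exactly the inputs on which A raises KeyError: a waypoint missing key "x" or "y".
def Pre_update_waypoint (turn : String) (angle : Int) (waypoint : List (String × Int)) : Prop :=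
  "x" ∈ waypoint.map Prod.fst ∧ "y" ∈ waypoint.map Prod.fst
instance (turn : String) (angle : Int) (waypoint : List (String × Int)) : Decidable (Pre_update_waypoint turn angle waypoint) := by unfold Pre_update_waypoint; infer_instance

def pvWitness_update_waypoint : String × Int × (List (String × Int)) := ("R", 90, [("x", 10), ("y", 4)])

def Spec_update_waypoint (turn : String) (angle : Int) (waypoint : List (String × Int)) (out : List (String × Int)) : Prop := out = update_waypoint_alt turn angle waypoint
instance (turn : String) (angle : Int) (waypoint : List (String × Int)) (out : List (String × Int)) : Decidable (Spec_update_waypoint turn angle waypoint out) := by unfold Spec_update_waypoint; infer_instance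

-- ===== CLAIM (what is proved, stated in full; the proofs are below) =====
def Claim_equal_update_waypoint : Prop := ∀ (turn : String) (angle : Int) (waypoint : List (String × Int)), Dom_update_waypoint turn angle waypoint → Pre_update_waypoint turn angle waypoint → Spec_update_waypoint turn angle waypoint (update_waypoint turn angle waypoint)

-- ===== LEMMAS AND PROOFS =====

-- The rotation index is one of 0, 1, 2, 3.
theorem uw_k_cases (angle : Int) :
    PySem.Int.floordiv (PySem.Int.mod angle 360) 90 = 0 ∨
    PySem.Int.floordiv (PySem.Int.mod angle 360) 90 = 1 ∨
    PySem.Int.floordiv (PySem.Int.mod angle 360) 90 = 2 ∨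
    PySem.Int.floordiv (PySem.Int.mod angle 360) 90 = 3 := by
  have h0 : (0 : Int) ≤ PySem.Int.mod angle 360 := PySem.Int.mod_nonneg angle (by norm_num)
  have h1 : PySem.Int.mod angle 360 < 360 := PySem.Int.mod_lt angle (by norm_num)
  have hle : (0 : Int) ≤ PySem.Int.floordiv (PySem.Int.mod angle 360) 90 :=
    (PySem.Int.le_floordiv_iff_mul_le (by norm_num : (0:Int) < 90)).mpr (by omega)
  have hlt : PySem.Int.floordiv (PySem.Int.mod angle 360) 90 < 4 :=
    (PySem.Int.floordiv_lt_iff_lt_mul (by norm_num : (0:Int) < 90)).mpr (by omega)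
  omega

-- Right turn: A's k-step loop equals B's matrix step with q = k.
theorem uw_rotR (k x y : Int) (hk : k = 0 ∨ k = 1 ∨ k = 2 ∨ k = 3) :
    (PySem.List.pyRange 0 k 1).foldl (fun (p : Int × Int) _ => (p.2, -p.1)) (x, y)
      = (let cs := PySem.List.pyGetD [((1:Int), (0:Int)), (0, 1), (-1, 0), (0, -1)] k (1, 0)
         (cs.1 * x + cs.2 * y, cs.1 * y - cs.2 * x)) := by
  rcases hk with h | h | h | h <;> subst h <;>
    simp [PySem.List.pyRange_one, PySem.List.pyGetD, List.range_succ, List.foldl]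

-- Left turn: A's k-step loop equals B's matrix step with q = (-k) % 4.
theorem uw_rotL (k x y : Int) (hk : k = 0 ∨ k = 1 ∨ k = 2 ∨ k = 3) :
    (PySem.List.pyRange 0 k 1).foldl (fun (p : Int × Int) _ => (-p.2, p.1)) (x, y)
      = (let cs := PySem.List.pyGetD [((1:Int), (0:Int)), (0, 1), (-1, 0), (0, -1)] (PySem.Int.mod (-k) 4) (1, 0)
         (cs.1 * x + cs.2 * y, cs.1 * y - cs.2 * x)) := by
  rcases hk with h | h | h | h <;> subst h <;>
    simp [PySem.List.pyRange_one, PySem.List.pyGetD, PySem.Int.mod, List.range_succ, List.foldl]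

-- ===== VERDICT (by name: the statement is the Claim_ definition above) =====
theorem update_waypoint_spec : Claim_equal_update_waypoint := by
  intro turn angle waypoint _ _
  unfold Spec_update_waypoint update_waypoint update_waypoint_alt
  have hk := uw_k_cases angle
  by_cases hR : turn = "R"
  · simp only [hR, String.reduceEq, reduceIte]
    rw [uw_rotR _ _ _ hk]
  · by_cases hL : turn = "L"
    · simp only [hL, String.reduceEq, reduceIte]
      rw [uw_rotL _ _ _ hk]
    · simp only [if_neg hR, if_neg hL]
      norm_num [PySem.List.pyGetD, PySem.List.pyIdx?]
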